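-- pv_equiv track=rewrite | github.com/Sambhav0707/DSA_07 | 3917-count-indices-with-opposite-parity/3917-count-indices-with-opposite-parity.py | countOppositeParity
-- ===== SOURCE A (Python) =====
-- def countOppositeParity(nums: list[int]) -> list[int]:
--     answer = [0] * len(nums)
--     odd = 0
--     even = 0
--
--     if nums[len(nums) - 1] % 2 == 0:
--         even += 1
--     else:
--         odd += 1
--
--     for i in range(len(nums) - 2 , -1,-1):
--         if nums[i] % 2 == 0:
--             answer[i] = odd
--             even += 1
--         else:
--             answer[i] = even
--             odd += 1
--
--     return answer
-- ===== SOURCE B (Python) =====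
-- def countOppositeParity(nums: list[int]) -> list[int]:
--     total_even = sum(1 for x in nums if x % 2 == 0)
--     total_odd = len(nums) - total_even
--     answer = []
--     prefix_even = 0
--     prefix_odd = 0
--     for x in nums:
--         if x % 2 == 0:
--             answer.append(total_odd - prefix_odd)
--             prefix_even += 1
--         else:
--             answer.append(total_even - prefix_even)
--             prefix_odd += 1
--     return answer
-- ===== Notes on version B (the rewrite author's own statement) =====
-- stated objective: simpler
-- what changed: Replaces A's backward suffix-counting pass that writes into a preallocated answer array by index with a forward two-pass: first count total evens/odds, then one forward pass appending total_opposite minus the prefix count seen so far.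
import Mathlib
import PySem

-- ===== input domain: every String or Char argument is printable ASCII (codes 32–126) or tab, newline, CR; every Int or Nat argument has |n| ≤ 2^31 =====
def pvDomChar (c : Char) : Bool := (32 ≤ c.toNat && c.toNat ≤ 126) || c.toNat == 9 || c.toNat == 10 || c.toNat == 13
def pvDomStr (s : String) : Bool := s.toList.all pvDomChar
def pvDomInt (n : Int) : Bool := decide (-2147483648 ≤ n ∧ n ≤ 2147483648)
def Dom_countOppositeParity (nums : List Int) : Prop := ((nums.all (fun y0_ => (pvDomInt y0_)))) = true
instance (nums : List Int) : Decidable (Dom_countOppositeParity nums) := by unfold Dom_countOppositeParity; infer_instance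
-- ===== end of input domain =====

-- ===== PORT A =====
-- B replaces A's backward suffix pass with a forward totals-minus-prefix pass (simpler decomposition, same O(n)); on [] A raises IndexError while B returns [].

-- state: (answer, odd, even)
def pvStepA (nums : List Int) (st : List Int × Int × Int) (i : Int) : List Int × Int × Int :=
  match PySem.List.pyGet? nums i with
  | none => st  -- IndexError; unreachable: the loop indices are in range
  | some x =>
    if PySem.Int.mod x 2 == 0 then (st.1.set i.toNat st.2.1, st.2.1, st.2.2 + 1)
    else (st.1.set i.toNat st.2.2, st.2.1 + 1, st.2.2)

def countOppositeParity (nums : List Int) : List Int :=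
  let answer := List.replicate nums.length (0 : Int)
  match PySem.List.pyGet? nums ((nums.length : Int) - 1) with
  | none => []  -- Python raises IndexError here; excluded by Pre_
  | some last =>
    let oe : Int × Int := if PySem.Int.mod last 2 == 0 then (0, 1) else (1, 0)
    ((PySem.List.pyRange ((nums.length : Int) - 2) (-1) (-1)).foldl
        (pvStepA nums) (answer, oe.1, oe.2)).1

-- ===== PORT B =====
-- state: (answer, prefix_even, prefix_odd)
def pvStepB (totalEven totalOdd : Int) (st : List Int × Int × Int) (x : Int) : List Int × Int × Int :=
  if PySem.Int.mod x 2 == 0 then (st.1 ++ [totalOdd - st.2.2], st.2.1 + 1, st.2.2)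
  else (st.1 ++ [totalEven - st.2.1], st.2.1, st.2.2 + 1)

def countOppositeParity_alt (nums : List Int) : List Int :=
  let totalEven : Int := ((nums.filter (fun x => PySem.Int.mod x 2 == 0)).length : Int)
  let totalOdd : Int := (nums.length : Int) - totalEven
  (nums.foldl (pvStepB totalEven totalOdd) ([], 0, 0)).1

-- ===== PRECONDITION & SPEC =====
-- A reads nums[len(nums)-1] unconditionally, so it raises IndexError on the empty list (B naturally returns [] there).
def Pre_countOppositeParity (nums : List Int) : Prop := nums ≠ []
instance (nums : List Int) : Decidable (Pre_countOppositeParity nums) := by unfold Pre_countOppositeParity; infer_instance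
def pvWitness_countOppositeParity : List Int := [3, 4, 7]

def Spec_countOppositeParity (nums : List Int) (out : List Int) : Prop := out = countOppositeParity_alt nums
instance (nums : List Int) (out : List Int) : Decidable (Spec_countOppositeParity nums out) := by unfold Spec_countOppositeParity; infer_instance

-- ===== CLAIM (what is proved, stated in full; the proofs are below) =====
def Claim_equal_countOppositeParity : Prop := ∀ (nums : List Int), Dom_countOppositeParity nums → Pre_countOppositeParity nums → Spec_countOppositeParity nums (countOppositeParity nums)

-- ===== LEMMAS AND PROOFS =====

-- reference function: entry i = number of opposite-parity elements strictly to the right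
def pvEvens (l : List Int) : Int := ((l.filter (fun x => PySem.Int.mod x 2 == 0)).length : Int)
def pvOdds (l : List Int) : Int := ((l.filter (fun x => !(PySem.Int.mod x 2 == 0))).length : Int)
def pvSpecF : List Int → List Int
  | [] => []
  | x :: xs => (if PySem.Int.mod x 2 == 0 then pvOdds xs else pvEvens xs) :: pvSpecF xs

lemma pvEvens_nil : pvEvens [] = 0 := rfl
lemma pvOdds_nil : pvOdds [] = 0 := rfl

lemma pvEvens_cons (x : Int) (xs : List Int) :
    pvEvens (x :: xs) = (if PySem.Int.mod x 2 == 0 then 1 else 0) + pvEvens xs := by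
  by_cases h : (PySem.Int.mod x 2 == 0) = true
  · rw [if_pos h]
    simp only [pvEvens, List.filter_cons, h, if_pos, List.length_cons]
    push_cast
    ring
  · rw [if_neg h]
    simp only [pvEvens, List.filter_cons, h]
    simp

lemma pvOdds_cons (x : Int) (xs : List Int) :
    pvOdds (x :: xs) = (if PySem.Int.mod x 2 == 0 then 0 else 1) + pvOdds xs := by
  by_cases h : (PySem.Int.mod x 2 == 0) = true
  · rw [if_pos h]
    simp only [pvOdds, List.filter_cons, h, Bool.not_true]
    simp
  · rw [if_neg h]
    have hb : (!(PySem.Int.mod x 2 == 0)) = true := by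
      cases hc : (PySem.Int.mod x 2 == 0) <;> simp_all
    simp only [pvOdds, List.filter_cons, hb, if_pos, List.length_cons]
    push_cast
    ring

lemma pvEvens_add_pvOdds (l : List Int) : pvEvens l + pvOdds l = (l.length : Int) := by
  induction l with
  | nil => simp [pvEvens_nil, pvOdds_nil]
  | cons x xs ih =>
    rw [pvEvens_cons, pvOdds_cons, List.length_cons]
    push_cast
    split_ifs <;> omega

lemma pvSpecF_drop (l : List Int) : ∀ k, (pvSpecF l).drop k = pvSpecF (l.drop k) := by
  induction l with
  | nil => intro k; simp [pvSpecF]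
  | cons x xs ih =>
    intro k
    cases k with
    | zero => simp
    | succ k => simpa [pvSpecF] using ih k

-- B's loop invariant: the prefix counters are the totals minus the counts of the rest
lemma pvB_loop (tE tO : Int) (l : List Int) : ∀ (acc : List Int) (pe po : Int),
    pe = tE - pvEvens l → po = tO - pvOdds l →
    (l.foldl (pvStepB tE tO) (acc, pe, po)).1 = acc ++ pvSpecF l := by
  induction l with
  | nil => intro acc pe po _ _; simp [pvSpecF]
  | cons x xs ih =>
    intro acc pe po hpe hpo
    rw [pvEvens_cons] at hpe
    rw [pvOdds_cons] at hpo
    by_cases h : (PySem.Int.mod x 2 == 0) = true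
    · rw [if_pos h] at hpe hpo
      have hfold : (x :: xs).foldl (pvStepB tE tO) (acc, pe, po)
          = xs.foldl (pvStepB tE tO) (acc ++ [tO - po], pe + 1, po) := by
        rw [List.foldl_cons]
        unfold pvStepB
        rw [if_pos h]
      rw [hfold, ih _ _ _ (by omega) (by omega)]
      have hv : tO - po = pvOdds xs := by omega
      have hspec : pvSpecF (x :: xs) = pvOdds xs :: pvSpecF xs := by
        show (if PySem.Int.mod x 2 == 0 then pvOdds xs else pvEvens xs) :: pvSpecF xs = _
        rw [if_pos h]
      rw [hv, hspec, List.append_assoc, List.singleton_append]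
    · rw [if_neg h] at hpe hpo
      have hfold : (x :: xs).foldl (pvStepB tE tO) (acc, pe, po)
          = xs.foldl (pvStepB tE tO) (acc ++ [tE - pe], pe, po + 1) := by
        rw [List.foldl_cons]
        unfold pvStepB
        rw [if_neg h]
      rw [hfold, ih _ _ _ (by omega) (by omega)]
      have hv : tE - pe = pvEvens xs := by omega
      have hspec : pvSpecF (x :: xs) = pvEvens xs :: pvSpecF xs := by
        show (if PySem.Int.mod x 2 == 0 then pvOdds xs else pvEvens xs) :: pvSpecF xs = _
        rw [if_neg h]
      rw [hv, hspec, List.append_assoc, List.singleton_append]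

lemma pvB_eq_spec (nums : List Int) : countOppositeParity_alt nums = pvSpecF nums := by
  have h := pvB_loop (pvEvens nums) ((nums.length : Int) - pvEvens nums) nums [] 0 0
    (by omega) (by have := pvEvens_add_pvOdds nums; omega)
  rw [List.nil_append] at h
  exact h

-- setting index m in (replicate (m+1) 0 ++ tail)
lemma pvSet_replicate (v : Int) : ∀ (m : Nat) (tail : List Int),
    (List.replicate (m + 1) (0 : Int) ++ tail).set m v = List.replicate m (0 : Int) ++ v :: tail := by
  intro m
  induction m with
  | zero => intro tail; simp
  | succ m ih =>
    intro tail
    calc (List.replicate (m + 1 + 1) (0 : Int) ++ tail).set (m + 1) v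
        = (0 : Int) :: ((List.replicate (m + 1) (0 : Int) ++ tail).set m v) := rfl
      _ = (0 : Int) :: (List.replicate m (0 : Int) ++ v :: tail) := by rw [ih]
      _ = List.replicate (m + 1) (0 : Int) ++ v :: tail := rfl

-- A's loop invariant: state after having processed all indices ≥ m
lemma pvA_loop (nums : List Int) : ∀ (m : Nat), m ≤ nums.length →
    ((PySem.List.pyRange ((m : Int) - 1) (-1) (-1)).foldl (pvStepA nums)
        (List.replicate m (0 : Int) ++ (pvSpecF nums).drop m,
         pvOdds (nums.drop m), pvEvens (nums.drop m))).1 = pvSpecF nums := by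
  intro m
  induction m with
  | zero =>
    intro _
    rw [PySem.List.pyRange_neg_one_eq_nil (by norm_num)]
    simp
  | succ m ih =>
    intro hm
    have hml : m < nums.length := by omega
    have hrange : PySem.List.pyRange (((m + 1 : Nat) : Int) - 1) (-1) (-1)
        = (m : Int) :: PySem.List.pyRange ((m : Int) - 1) (-1) (-1) := by
      have h1 : (((m + 1 : Nat) : Int) - 1) = (m : Int) := by push_cast; ring
      rw [h1, PySem.List.pyRange_neg_one_cons (by omega)]
    rw [hrange, List.foldl_cons]
    have hget : PySem.List.pyGet? nums ((m : Int)) = some nums[m] := by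
      simp [hml]
    have hdrop : nums.drop m = nums[m] :: nums.drop (m + 1) := List.drop_eq_getElem_cons hml
    have hdropS : (pvSpecF nums).drop m
        = (if PySem.Int.mod nums[m] 2 == 0 then pvOdds (nums.drop (m + 1)) else pvEvens (nums.drop (m + 1)))
          :: (pvSpecF nums).drop (m + 1) := by
      rw [pvSpecF_drop, hdrop, pvSpecF_drop]
      rfl
    have hstate : pvStepA nums
        (List.replicate (m + 1) (0 : Int) ++ (pvSpecF nums).drop (m + 1),
         pvOdds (nums.drop (m + 1)), pvEvens (nums.drop (m + 1))) ((m : Int))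
        = (List.replicate m (0 : Int) ++ (pvSpecF nums).drop m,
           pvOdds (nums.drop m), pvEvens (nums.drop m)) := by
      unfold pvStepA
      rw [hget]
      dsimp only
      rw [Int.toNat_natCast]
      by_cases h : (PySem.Int.mod nums[m] 2 == 0) = true
      · rw [if_pos h, pvSet_replicate, hdropS, if_pos h, hdrop, pvOdds_cons, pvEvens_cons,
           if_pos h, if_pos h, zero_add, add_comm 1 (pvEvens (nums.drop (m + 1)))]
      · rw [if_neg h, pvSet_replicate, hdropS, if_neg h, hdrop, pvOdds_cons, pvEvens_cons,
           if_neg h, if_neg h, zero_add, add_comm 1 (pvOdds (nums.drop (m + 1)))]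
    rw [hstate]
    exact ih (le_of_lt hml)

lemma pvA_eq_spec (nums : List Int) (hpre : nums ≠ []) :
    countOppositeParity nums = pvSpecF nums := by
  have hn : 1 ≤ nums.length := List.length_pos_iff.mpr hpre
  have hlt : nums.length - 1 < nums.length := by omega
  have hc : (nums.length : Int) - 1 = ((nums.length - 1 : Nat) : Int) := by omega
  have hget : PySem.List.pyGet? nums ((nums.length : Int) - 1)
      = some nums[nums.length - 1] := by
    rw [hc]
    simp [hlt]
  have hdrop1 : nums.drop (nums.length - 1) = [nums[nums.length - 1]] := by
    rw [List.drop_eq_getElem_cons hlt]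
    have h1 : nums.length - 1 + 1 = nums.length := by omega
    rw [h1, List.drop_length]
  have hdropS : (pvSpecF nums).drop (nums.length - 1) = [0] := by
    rw [pvSpecF_drop, hdrop1]
    simp [pvSpecF, pvOdds_nil, pvEvens_nil]
  have hrep : List.replicate nums.length (0 : Int)
      = List.replicate (nums.length - 1) (0 : Int) ++ (pvSpecF nums).drop (nums.length - 1) := by
    rw [hdropS]
    have h1 : nums.length = (nums.length - 1) + 1 := by omega
    conv_lhs => rw [h1]
    rw [List.replicate_succ']
  have hstart : (nums.length : Int) - 2 = ((nums.length - 1 : Nat) : Int) - 1 := by omega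
  have hA := pvA_loop nums (nums.length - 1) (by omega)
  unfold countOppositeParity
  rw [hget]
  dsimp only
  rw [hstart, hrep]
  by_cases h : (PySem.Int.mod nums[nums.length - 1] 2 == 0) = true
  · have ho : pvOdds (nums.drop (nums.length - 1)) = 0 := by
      rw [hdrop1, pvOdds_cons, if_pos h, pvOdds_nil]; norm_num
    have he : pvEvens (nums.drop (nums.length - 1)) = 1 := by
      rw [hdrop1, pvEvens_cons, if_pos h, pvEvens_nil]; norm_num
    rw [ho, he] at hA
    rw [if_pos h]
    exact hA
  · have ho : pvOdds (nums.drop (nums.length - 1)) = 1 := by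
      rw [hdrop1, pvOdds_cons, if_neg h, pvOdds_nil]; norm_num
    have he : pvEvens (nums.drop (nums.length - 1)) = 0 := by
      rw [hdrop1, pvEvens_cons, if_neg h, pvEvens_nil]; norm_num
    rw [ho, he] at hA
    rw [if_neg h]
    exact hA

-- ===== VERDICT (by name: the statement is the Claim_ definition above) =====
theorem countOppositeParity_spec : Claim_equal_countOppositeParity := by
  intro nums _ hpre
  unfold Spec_countOppositeParity
  rw [pvA_eq_spec nums hpre, pvB_eq_spec]
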